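-- pv_equiv track=rewrite | github.com/cn-dataworks/pbi-squire-plugin | tools/developer/query_folding_validator.py | _is_concatenation
-- ===== SOURCE A (Python) =====
-- def _is_concatenation(line):
--     """Check if & is used for concatenation (not in string)."""
--     # Simple heuristic: if & appears outside quotes
--     in_string = False
--     for char in line:
--         if char == '"':
--             in_string = not in_string
--         elif char == '&' and not in_string:
--             return True
--     return False
-- ===== SOURCE B (Python) =====
-- def _is_concatenation(line):
--     """Check if & is used for concatenation (not in string)."""
--     # Segments at even indices of line.split('"') are outside quotes.
--     return any('&' in seg for seg in line.split('"')[::2])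
-- ===== Notes on version B (the rewrite author's own statement) =====
-- stated objective: simpler
-- what changed: Replaces the character-by-character quote-toggling state machine with a one-liner that splits the line on the double-quote character and checks the even-indexed (outside-quote) segments for an ampersand.
import Mathlib
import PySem

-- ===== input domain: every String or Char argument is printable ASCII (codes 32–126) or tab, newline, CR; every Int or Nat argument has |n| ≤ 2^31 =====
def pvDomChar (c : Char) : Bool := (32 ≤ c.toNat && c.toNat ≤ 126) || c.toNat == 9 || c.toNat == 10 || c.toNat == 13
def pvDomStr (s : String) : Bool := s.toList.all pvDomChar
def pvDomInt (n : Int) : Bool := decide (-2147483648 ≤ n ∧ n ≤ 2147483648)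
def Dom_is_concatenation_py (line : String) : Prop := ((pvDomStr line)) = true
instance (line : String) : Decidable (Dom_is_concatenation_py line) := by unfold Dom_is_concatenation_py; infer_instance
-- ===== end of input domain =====

-- B replaces A's char-by-char quote-toggling state machine by split-on-quote then
-- scanning the even-indexed (outside-quote) segments; objective: simpler.


-- ===== PORT A =====
-- the 'for char in line' loop with early return, state in_string
def isConcatLoop : List Char → Bool → Bool
  | [], _ => false
  | c :: rest, inS =>
    if c = '"' then isConcatLoop rest (!inS)
    else if c = '&' && !inS then true
    else isConcatLoop rest inS

def is_concatenation_py (line : String) : Bool :=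
  isConcatLoop line.toList false

-- ===== PORT B =====
-- any('&' in seg for seg in line.split('"')[::2]); the step-2 slice never raises, so getD [] is never taken
def is_concatenation_py_alt (line : String) : Bool :=
  ((PySem.List.slice? (PySem.Chars.splitOn line.toList ['"']) none none 2).getD []).any
    (fun seg => PySem.Chars.isIn ['&'] seg)

-- ===== PRECONDITION & SPEC =====
def Spec_is_concatenation_py (line : String) (out : Bool) : Prop := out = is_concatenation_py_alt line
instance (line : String) (out : Bool) : Decidable (Spec_is_concatenation_py line out) := by unfold Spec_is_concatenation_py; infer_instance

-- ===== CLAIM (what is proved, stated in full; the proofs are below) =====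
def Claim_equal_is_concatenation_py : Prop := ∀ (line : String), Dom_is_concatenation_py line → Spec_is_concatenation_py line (is_concatenation_py line)

-- ===== LEMMAS AND PROOFS =====

-- structural version of split on the single character '"'
def splitQ : List Char → List (List Char)
  | [] => [[]]
  | c :: rest =>
    if c = '"' then [] :: splitQ rest
    else
      match splitQ rest with
      | [] => [[c]]
      | h :: t => (c :: h) :: t

lemma splitQ_ne_nil (l : List Char) : splitQ l ≠ [] := by
  cases l with
  | nil => simp [splitQ]
  | cons c rest =>
    simp only [splitQ]
    split
    · simp
    · split <;> simp

lemma splitOn_go_eq (fuel : Nat) (l cur : List Char)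
    (accs : List (List Char)) (h : l.length < fuel) :
    PySem.Chars.splitOn.go ['"'] fuel l cur accs
      = accs.reverse ++ (cur.reverse ++ (splitQ l).headI) :: (splitQ l).tail := by
  induction fuel generalizing l cur accs with
  | zero => omega
  | succ n ih =>
    cases l with
    | nil =>
      simp [PySem.Chars.splitOn.go, splitQ]
    | cons c rest =>
      obtain ⟨hh, tt, hht⟩ := List.exists_cons_of_ne_nil (splitQ_ne_nil rest)
      have hrest : rest.length < n := by
        simpa using Nat.lt_of_succ_lt_succ (by simpa using h)
      by_cases hc : c = '"'
      · subst hc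
        have hp : List.isPrefixOf ['"'] ('"' :: rest) = true := by
          simp [List.isPrefixOf]
        simp only [PySem.Chars.splitOn.go, hp, if_pos, List.length_cons, List.length_nil,
          List.drop_succ_cons, List.drop_zero]
        rw [ih rest [] (cur.reverse :: accs) hrest]
        simp [splitQ, hht]
      · have hp : List.isPrefixOf ['"'] (c :: rest) = false := by
          simp [List.isPrefixOf]
          exact fun h' => hc h'.symm
        simp only [PySem.Chars.splitOn.go, hp, Bool.false_eq_true, if_false]
        rw [ih rest (c :: cur) accs hrest]
        simp [splitQ, hc, hht]

lemma splitOn_eq_splitQ (cs : List Char) :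
    PySem.Chars.splitOn cs ['"'] = splitQ cs := by
  unfold PySem.Chars.splitOn
  rw [splitOn_go_eq cs.length.succ cs [] [] (Nat.lt_succ_self _)]
  obtain ⟨hh, tt, hht⟩ := List.exists_cons_of_ne_nil (splitQ_ne_nil cs)
  simp [hht]

-- elements at even indices
def evens {α : Type} : List α → List α
  | [] => []
  | [x] => [x]
  | x :: _ :: rest => x :: evens rest

lemma filterMap_evens {α : Type} (xs : List α) :
    List.filterMap (fun k => xs[2 * k]?) (List.range ((xs.length + 1) / 2)) = evens xs := by
  induction xs using evens.induct with
  | case1 => simp [evens]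
  | case2 x => simp [evens, List.range_succ]
  | case3 x y rest ih =>
    have hlen : ((x :: y :: rest).length + 1) / 2 = (rest.length + 1) / 2 + 1 := by
      simp only [List.length_cons]; omega
    rw [hlen, List.range_succ_eq_map, List.filterMap_cons, List.filterMap_map]
    simp only [Nat.mul_zero, List.getElem?_cons_zero]
    have : (fun k => (x :: y :: rest)[2 * (k + 1)]?) = (fun k => rest[2 * k]?) := by
      funext k
      have : 2 * (k + 1) = 2 * k + 1 + 1 := by omega
      simp [this]
    simp only [Function.comp_def]
    rw [show (fun a => (x :: y :: rest)[2 * (a + 1)]?) = (fun k => rest[2 * k]?) from this, ih]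
    simp [evens]

lemma slice?_step_two {α : Type} (xs : List α) :
    PySem.List.slice? xs none none 2 = some (evens xs) := by
  simp only [PySem.List.slice?, PySem.List.sliceIndices]
  norm_num
  have hcount : (if 0 < xs.length
      then (((xs.length : Int) + 2 - 1) / 2).toNat else 0) = (xs.length + 1) / 2 := by
    split <;> omega
  rw [hcount]
  have harg : (fun k : Nat => xs[((2 : Int) * (k : Int)).toNat]?) = (fun k : Nat => xs[2 * k]?) := by
    funext k
    have h2 : ((2 : Int) * (k : Int)).toNat = 2 * k := by omega
    rw [h2]
  rw [harg]
  exact filterMap_evens xs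

-- main loop invariant: A's scan from state inS equals '&' found in an even segment of the
-- remaining split (odd segment when currently inside a string, i.e. evens of the tail)
lemma loop_eq_evens (cs : List Char) :
    ∀ inS : Bool,
      isConcatLoop cs inS
        = (evens (if inS then (splitQ cs).tail else splitQ cs)).any
            (fun seg => seg.contains '&') := by
  induction cs with
  | nil => intro inS; cases inS <;> simp [isConcatLoop, splitQ, evens]
  | cons c rest ih =>
    intro inS
    obtain ⟨hh, tt, hht⟩ := List.exists_cons_of_ne_nil (splitQ_ne_nil rest)
    by_cases hc : c = '"'
    · subst hc
      simp only [isConcatLoop, splitQ, ih]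
      cases inS with
      | false =>
        simp only [Bool.not_false, if_true, List.tail_cons]
        cases tt with
        | nil => simp [hht, evens]
        | cons t1 t2 => simp [hht, evens]
      | true => simp [hht]
    · have hsplit : splitQ (c :: rest) = (c :: hh) :: tt := by
        simp [splitQ, hc, hht]
      cases inS with
      | true =>
        simp only [isConcatLoop, if_neg hc, Bool.not_true, Bool.and_false, Bool.false_eq_true,
          if_false, ih, if_true, hsplit, List.tail_cons, hht]
      | false =>
        by_cases ha : c = '&'
        · subst ha
          simp only [isConcatLoop, if_neg hc, Bool.not_false, Bool.and_true, decide_true,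
            if_true, hsplit]
          cases tt with
          | nil => simp [evens]
          | cons t1 t2 => simp [evens]
        · have hb : (c = '&' && !false) = false := by simp [ha]
          simp only [isConcatLoop, if_neg hc, hb, Bool.false_eq_true, if_false, ih, hsplit, hht]
          cases tt with
          | nil => simp [evens, Ne.symm ha]
          | cons t1 t2 => simp [evens, Ne.symm ha]

lemma isIn_amp (seg : List Char) :
    PySem.Chars.isIn ['&'] seg = seg.contains '&' := by
  rw [Bool.eq_iff_iff, PySem.Chars.isIn_iff_infix, List.singleton_infix_iff,
    List.contains_iff_mem]

-- ===== VERDICT (by name: the statement is the Claim_ definition above) =====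
theorem is_concatenation_py_spec : Claim_equal_is_concatenation_py := by
  intro line _
  unfold Spec_is_concatenation_py is_concatenation_py is_concatenation_py_alt
  rw [splitOn_eq_splitQ, slice?_step_two]
  simp only [Option.getD_some]
  rw [loop_eq_evens line.toList false]
  simp [isIn_amp]
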